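-- pv_equiv track=rewrite | github.com/haaland09009/Programmers | practice/귤 고르기.py | solution
-- ===== SOURCE A (Python) =====
-- def solution(k, tangerine):
--     tangerine.sort()
--
--     dic = {}
--     for i in tangerine:
--         if i not in dic:
--             dic[i] = 1
--         else:
--             dic[i] += 1
--
--     count_list = [] # 귤의 종류를 담을 리스트
--     answer = 0
--     for a,b in sorted(dic.items(), key=lambda x:x[1], reverse=True):
--         answer += b
--         count_list.append(a) # 귤의 종류를 담는다.
--         if answer >= k: # 지금까지 담은 귤의 수가 경화가 한 상자에 담으려는 귤의 수이거나 그 이상일 때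
--             return len(count_list)
-- ===== SOURCE B (Python) =====
-- def solution(k, tangerine):
--     # Count frequencies, counting-sort the frequencies into buckets,
--     # then take whole buckets from the largest frequency down, finishing the
--     # last bucket with a ceiling division (at least one type is always taken).
--     counts = {}
--     for t in tangerine:
--         counts[t] = counts.get(t, 0) + 1
--     buckets = [0] * (len(tangerine) + 1)
--     for c in counts.values():
--         buckets[c] += 1
--     total = 0
--     types = 0
--     for c in range(len(tangerine), 0, -1):
--         m = buckets[c]
--         if m == 0:
--             continue
--         if total + c * m < k:
--             total += c * m
--             types += m
--         else:
--             need = -((total - k) // c)  # ceil((k - total) / c)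
--             return types + (need if need >= 1 else 1)
--     return types
-- ===== Notes on version B (the rewrite author's own statement) =====
-- stated objective: alternative
-- what changed: A sorts the list and then sorts the frequency table by count (two comparison sorts) and accumulates type by type; B counts frequencies once, counting-sorts the counts into buckets indexed by frequency, and consumes whole buckets from the largest frequency down, finishing the last bucket with one ceiling division instead of a per-type loop.
-- outside the precondition, e.g. on solution(5, [1]): A returns None, B returns 1
import Mathlib
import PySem

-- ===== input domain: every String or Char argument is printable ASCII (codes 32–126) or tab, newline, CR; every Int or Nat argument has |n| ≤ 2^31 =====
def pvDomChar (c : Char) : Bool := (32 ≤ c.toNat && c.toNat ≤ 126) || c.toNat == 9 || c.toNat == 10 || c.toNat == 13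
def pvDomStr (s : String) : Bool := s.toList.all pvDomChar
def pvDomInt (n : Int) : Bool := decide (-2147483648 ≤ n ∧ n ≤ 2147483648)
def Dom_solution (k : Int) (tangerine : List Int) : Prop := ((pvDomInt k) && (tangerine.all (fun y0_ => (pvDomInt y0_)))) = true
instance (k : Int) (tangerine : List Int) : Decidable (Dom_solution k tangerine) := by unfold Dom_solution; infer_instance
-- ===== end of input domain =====

-- B replaces A's two comparison sorts by a single counting pass plus frequency buckets
-- consumed from the largest frequency down (last bucket closed by one ceiling division).
-- NOTE: Python A sorts `tangerine` in place (an observable mutation); B does not mutate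
-- its argument — the equivalence proved here is about the RETURN value only.

-- ===== PORT A =====
-- the `for a,b in sorted(...)` loop with early return; `none` = falling off the end (Python returns None)
def solnLoopA (k : Int) : List (Int × Int) → Int → List Int → Option Int
  | [], _, _ => none
  | (a, b) :: rest, answer, countList =>
      let answer' := answer + b
      let countList' := countList ++ [a]
      if k ≤ answer' then some (countList'.length : Int)
      else solnLoopA k rest answer' countList'

def solution (k : Int) (tangerine : List Int) : Int :=
  let tangerine' := PySem.List.sorted tangerine (fun x => x) false   -- tangerine.sort()
  let dic := tangerine'.foldl
      (fun d i => if ¬ (d.contains i = true) then d.insert i 1 else d.insert i (d.getD i 0 + 1))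
      (PySem.Dict.empty (κ := Int) (ν := Int))
  -- A returns None when the loop exhausts (only outside Pre_solution); mapped to 0 here
  (solnLoopA k (PySem.List.sorted dic.items (fun x => x.2) true) 0 []).getD 0

-- ===== PORT B =====
-- the `for c in range(len(tangerine), 0, -1)` loop of Source B with its early return
def solnLoopB (k : Int) (buckets : List Int) : List Int → Int → Int → Int
  | [], _, types => types
  | c :: rest, total, types =>
      let m := PySem.List.pyGetD buckets c 0
      if m = 0 then solnLoopB k buckets rest total types
      else if total + c * m < k then solnLoopB k buckets rest (total + c * m) (types + m)
      else
        let need := -(PySem.Int.floordiv (total - k) c)   -- ceil((k-total)/c)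
        types + (if 1 ≤ need then need else 1)

def solution_alt (k : Int) (tangerine : List Int) : Int :=
  let counts := tangerine.foldl
      (fun d t => d.insert t (d.getD t 0 + 1))
      (PySem.Dict.empty (κ := Int) (ν := Int))
  let buckets := counts.values.foldl
      (fun b c => PySem.List.pySetD b c (PySem.List.pyGetD b c 0 + 1))
      (PySem.List.pyRepeat [(0 : Int)] ((tangerine.length : Int) + 1))
  solnLoopB k buckets (PySem.List.pyRange (tangerine.length : Int) 0 (-1)) 0 0

-- ===== PRECONDITION & SPEC =====
-- Pre_ excludes exactly the inputs on which A falls off its loop and returns None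
-- (no Int value): the empty list, and k greater than the total number of tangerines.
def Pre_solution (k : Int) (tangerine : List Int) : Prop :=
  tangerine ≠ [] ∧ k ≤ (tangerine.length : Int)
instance (k : Int) (tangerine : List Int) : Decidable (Pre_solution k tangerine) := by
  unfold Pre_solution; infer_instance

def pvWitness_solution : Int × List Int := (2, [1, 1, 2])

def Spec_solution (k : Int) (tangerine : List Int) (out : Int) : Prop := out = solution_alt k tangerine
instance (k : Int) (tangerine : List Int) (out : Int) : Decidable (Spec_solution k tangerine out) := by unfold Spec_solution; infer_instance

-- ===== CLAIM (what is proved, stated in full; the proofs are below) =====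
def Claim_equal_solution : Prop := ∀ (k : Int) (tangerine : List Int), Dom_solution k tangerine → Pre_solution k tangerine → Spec_solution k tangerine (solution k tangerine)

-- ===== LEMMAS AND PROOFS =====

-- the common abstraction of both loops: scan a list of counts, accumulating sum `a` and
-- number of types `t`; return `some (t+1)` at the first type whose count reaches k.
def scanC (k : Int) : List Int → Int → Int → Option Int
  | [], _, _ => none
  | c :: rest, a, t => if k ≤ a + c then some (t + 1) else scanC k rest (a + c) (t + 1)

-- the multiset of counts encoded by B's buckets over a list of frequencies
def expandB (buckets : List Int) (l : List Int) : List Int :=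
  l.flatMap (fun c => List.replicate (PySem.List.pyGetD buckets c 0).toNat c)

lemma solnLoopA_eq_scanC (k : Int) (L : List (Int × Int)) :
    ∀ answer countList, solnLoopA k L answer countList
      = scanC k (L.map (·.2)) answer (countList.length : Int) := by
  induction L with
  | nil => intro _ _; rfl
  | cons p rest ih =>
      intro answer countList
      obtain ⟨a, b⟩ := p
      simp only [solnLoopA, scanC, List.map]
      split_ifs with h
      · simp [List.length_append]
      · rw [ih]
        congr 1
        simp [List.length_append]

lemma scanC_isSome (k : Int) (cs : List Int) :
    ∀ a t, cs ≠ [] → k ≤ a + cs.sum → (scanC k cs a t).isSome = true := by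
  induction cs with
  | nil => intro a t h _; exact absurd rfl h
  | cons c rest ih =>
      intro a t _ hsum
      simp only [scanC]
      split_ifs with hc
      · rfl
      · rcases rest with _ | ⟨r, rs⟩
        · simp at hsum; omega
        · exact ih (a + c) (t + 1) (by simp) (by simp at hsum ⊢; omega)

-- ceiling-division arithmetic for the last bucket
lemma need_ge_one_iff (c a k : Int) (hc : 0 < c) :
    (1 ≤ -(PySem.Int.floordiv (a - k) c)) ↔ a < k := by
  have h := PySem.Int.floordiv_lt_iff_lt_mul (a := a - k) (b := c) (q := 0) hc
  omega

lemma need_le_one_iff (c a k : Int) (hc : 0 < c) :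
    (-(PySem.Int.floordiv (a - k) c) ≤ 1) ↔ k ≤ a + c := by
  have h := PySem.Int.floordiv_lt_iff_lt_mul (a := a - k) (b := c) (q := -1) hc
  omega

lemma need_step (c a k : Int) (hc : 0 < c) :
    PySem.Int.floordiv (a - k) c = PySem.Int.floordiv (a + c - k) c - 1 := by
  rw [PySem.Int.floordiv_eq_ediv_of_pos hc, PySem.Int.floordiv_eq_ediv_of_pos hc]
  have : a + c - k = (a - k) + 1 * c := by ring
  rw [this, Int.add_mul_ediv_right _ _ (by omega : c ≠ 0)]
  omega

-- grouping: scanning m ≥ 1 copies of count c at once (B's bucket step)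
lemma scanC_replicate (k c : Int) (hc : 1 ≤ c) :
    ∀ (m : Nat), 1 ≤ m → ∀ (a t : Int) (rest : List Int),
      scanC k (List.replicate m c ++ rest) a t
        = if a + c * (m : Int) < k then scanC k rest (a + c * (m : Int)) (t + (m : Int))
          else some (t + (if 1 ≤ -(PySem.Int.floordiv (a - k) c) then -(PySem.Int.floordiv (a - k) c) else 1)) := by
  intro m hm
  induction m, hm using Nat.le_induction with
  | base =>
      intro a t rest
      simp only [List.replicate, List.cons_append, List.nil_append, scanC, Nat.cast_one, mul_one]
      have hle := need_le_one_iff c a k (by omega)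
      have hge := need_ge_one_iff c a k (by omega)
      by_cases h1 : k ≤ a + c
      · rw [if_pos h1, if_neg (by omega)]
        congr 1
        by_cases h3 : 1 ≤ -(PySem.Int.floordiv (a - k) c)
        · rw [if_pos h3]; omega
        · rw [if_neg h3]
      · rw [if_neg h1, if_pos (by omega)]
  | succ m hm ih =>
      intro a t rest
      rw [List.replicate_succ, List.cons_append]
      have hcm : (0:Int) ≤ c * (m : Int) := by positivity
      simp only [scanC]
      by_cases h1 : k ≤ a + c
      · rw [if_pos h1, if_neg (by push_cast; nlinarith)]
        have hle := (need_le_one_iff c a k (by omega)).mpr h1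
        congr 1
        by_cases hk : a < k
        · have hg := (need_ge_one_iff c a k (by omega)).mpr hk
          rw [if_pos hg]; omega
        · rw [if_neg (by rw [need_ge_one_iff c a k (by omega)]; omega)]
      · rw [if_neg h1, ih (a + c) (t + 1) rest]
        have hsplit : c * ((m : Int) + 1) = c * (m : Int) + c := by ring
        by_cases h2 : a + c + c * (m : Int) < k
        · rw [if_pos h2, if_pos (by push_cast; omega)]
          congr 1 <;> push_cast <;> ring
        · have hs := need_step c a k (by omega)
          have hge : 1 ≤ -(PySem.Int.floordiv (a + c - k) c) :=
            (need_ge_one_iff c (a + c) k (by omega)).mpr (by omega)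
          have hge' : 1 ≤ -(PySem.Int.floordiv (a - k) c) :=
            (need_ge_one_iff c a k (by omega)).mpr (by omega)
          rw [if_neg h2, if_pos hge, if_neg (by push_cast; omega), if_pos hge']
          congr 1
          omega

lemma solnLoopB_eq_scanC (k : Int) (buckets : List Int) :
    ∀ (l : List Int), (∀ c ∈ l, 1 ≤ c ∧ 0 ≤ PySem.List.pyGetD buckets c 0) →
      ∀ a t, solnLoopB k buckets l a t
        = match scanC k (expandB buckets l) a t with
          | some r => r
          | none => t + ((expandB buckets l).length : Int) := by
  intro l
  induction l with
  | nil => intro _ a t; simp [solnLoopB, expandB, scanC]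
  | cons c rest ih =>
      intro h a t
      obtain ⟨hc, hm⟩ := h c (List.mem_cons_self)
      have hrest := fun x hx => h x (List.mem_cons_of_mem c hx)
      simp only [solnLoopB]
      have hexp : expandB buckets (c :: rest)
          = List.replicate (PySem.List.pyGetD buckets c 0).toNat c ++ expandB buckets rest := by
        simp [expandB]
      by_cases hz : PySem.List.pyGetD buckets c 0 = 0
      · rw [if_pos hz, hexp, hz]
        simpa using ih hrest a t
      · rw [if_neg hz]
        have hm1 : 1 ≤ (PySem.List.pyGetD buckets c 0).toNat := by omega
        have hcast : (((PySem.List.pyGetD buckets c 0).toNat : Int)) = PySem.List.pyGetD buckets c 0 := by omega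
        rw [hexp, scanC_replicate k c hc _ hm1 a t (expandB buckets rest), hcast]
        by_cases h2 : a + c * PySem.List.pyGetD buckets c 0 < k
        · rw [if_pos h2, if_pos h2, ih hrest]
          cases hscan : scanC k (expandB buckets rest)
              (a + c * PySem.List.pyGetD buckets c 0)
              (t + PySem.List.pyGetD buckets c 0) with
          | some r => rfl
          | none =>
              simp only [List.length_append, List.length_replicate, Nat.cast_add, hcast]
              ring
        · rw [if_neg h2, if_neg h2]

-- A's counting loop is Counter(tangerine)
lemma foldA_eq_counter (xs : List Int) :
    xs.foldl (fun d i => if ¬ (d.contains i = true) then d.insert i 1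
                         else d.insert i (d.getD i 0 + 1)) PySem.Dict.empty
      = PySem.Dict.counter xs := by
  rw [← PySem.Dict.foldl_insert_getD_add_one_eq_counter]
  congr 1
  funext d i
  by_cases hcont : d.contains i = true
  · simp [hcont]
  · have h0 := PySem.Dict.getD_of_not_contains d (k := i) 0 (by simpa using hcont)
    simp [hcont, h0]

lemma pyGetD_pySetD_int (b : List Int) (v c x : Int) (hv0 : 0 ≤ v) (hv1 : v < (b.length : Int))
    (hc0 : 0 ≤ c) :
    PySem.List.pyGetD (PySem.List.pySetD b v x) c 0
      = if c = v then x else PySem.List.pyGetD b c 0 := by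
  rw [PySem.List.pySetD_of_nonneg b x hv0,
      PySem.List.pyGetD_of_nonneg _ 0 hc0, PySem.List.pyGetD_of_nonneg _ 0 hc0]
  by_cases h : c = v
  · subst h
    rw [if_pos rfl, List.getD_eq_getElem?_getD,
        List.getElem?_set_self (by omega : c.toNat < b.length)]
    rfl
  · rw [if_neg h, List.getD_eq_getElem?_getD, List.getD_eq_getElem?_getD,
        List.getElem?_set_ne (by omega : v.toNat ≠ c.toNat)]

-- B's bucket-building loop is a counting sort of the frequency list
lemma buckets_getD (vs : List Int) : ∀ (b0 : List Int),
    (∀ v ∈ vs, 0 ≤ v ∧ v < (b0.length : Int)) →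
    ∀ c : Int, 0 ≤ c →
      PySem.List.pyGetD
          (vs.foldl (fun b v => PySem.List.pySetD b v (PySem.List.pyGetD b v 0 + 1)) b0) c 0
        = PySem.List.pyGetD b0 c 0 + (vs.count c : Int) := by
  induction vs with
  | nil => intro b0 _ c _; simp
  | cons v rest ih =>
      intro b0 hv c hc0
      obtain ⟨hv0, hv1⟩ := hv v List.mem_cons_self
      simp only [List.foldl_cons]
      have hlen : (PySem.List.pySetD b0 v (PySem.List.pyGetD b0 v 0 + 1)).length = b0.length :=
        PySem.List.length_pySetD b0 v _
      rw [ih _ (fun x hx => by rw [hlen]; exact hv x (List.mem_cons_of_mem v hx)) c hc0,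
          pyGetD_pySetD_int b0 v c _ hv0 hv1 hc0, List.count_cons]
      by_cases h : c = v
      · rw [if_pos h]
        simp [h]
        omega
      · rw [if_neg h]
        simp [show ¬ (v = c) from fun hh => h hh.symm]

-- values of Counter(xs): the list of multiplicities over the distinct elements
lemma values_counter (xs : List Int) :
    (PySem.Dict.counter xs).values
      = (PySem.Set.ofList xs).map (fun kk => ((xs.count kk : Nat) : Int)) := by
  show ((PySem.Dict.counter xs).items).map (·.2) = _
  rw [PySem.Dict.items_counter, List.map_map]
  rfl

lemma mem_values_counter (xs : List Int) (v : Int)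
    (hv : v ∈ (PySem.Dict.counter xs).values) : 1 ≤ v ∧ v ≤ (xs.length : Int) := by
  rw [values_counter] at hv
  obtain ⟨kk, hkk, rfl⟩ := List.mem_map.mp hv
  have hmem : kk ∈ xs := (PySem.Set.mem_ofList xs kk).mp hkk
  have h1 : 0 < xs.count kk := List.count_pos_iff.mpr hmem
  have h2 : xs.count kk ≤ xs.length := List.count_le_length
  omega

lemma sum_values_counter (xs : List Int) :
    ((PySem.Dict.counter xs).values).sum = (xs.length : Int) := by
  rw [values_counter]
  have hperm : (PySem.Set.ofList xs).Perm xs.dedup :=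
    (List.perm_ext_iff_of_nodup (PySem.Set.nodup_ofList xs) xs.nodup_dedup).mpr
      (fun a => by rw [PySem.Set.mem_ofList, List.mem_dedup])
  have := (hperm.map (fun kk => ((xs.count kk : Nat) : Int))).sum_eq
  rw [this]
  have : (xs.dedup.map (fun kk => ((xs.count kk : Nat) : Int))).sum
      = (((xs.dedup.map (fun kk => xs.count kk)).sum : Nat) : Int) := by
    rw [Nat.cast_list_sum, List.map_map]; rfl
  rw [this, List.sum_map_count_dedup_eq_length]

-- counters of rearrangements have the same multiset of values
lemma values_counter_perm (xs ys : List Int) (hp : xs.Perm ys) :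
    ((PySem.Dict.counter xs).values).Perm ((PySem.Dict.counter ys).values) := by
  rw [values_counter, values_counter]
  have hsets : (PySem.Set.ofList xs).Perm (PySem.Set.ofList ys) :=
    (List.perm_ext_iff_of_nodup (PySem.Set.nodup_ofList xs) (PySem.Set.nodup_ofList ys)).mpr
      (fun a => by rw [PySem.Set.mem_ofList, PySem.Set.mem_ofList]; exact hp.mem_iff)
  have hfun : (fun kk => ((xs.count kk : Nat) : Int)) = (fun kk => ((ys.count kk : Nat) : Int)) := by
    funext kk; rw [hp.count_eq kk]
  rw [hfun]
  exact hsets.map _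

lemma count_expandB (buckets : List Int) :
    ∀ l : List Int, l.Nodup → ∀ a : Int,
      (expandB buckets l).count a
        = if a ∈ l then (PySem.List.pyGetD buckets a 0).toNat else 0 := by
  intro l
  induction l with
  | nil => intro _ a; simp [expandB]
  | cons c rest ih =>
      intro hnd a
      have hexp : expandB buckets (c :: rest)
          = List.replicate (PySem.List.pyGetD buckets c 0).toNat c ++ expandB buckets rest := by
        simp [expandB]
      rw [hexp, List.count_append, List.count_replicate, ih hnd.of_cons a]
      by_cases h : a = c
      · subst h
        rw [if_pos (by simp), if_pos (List.mem_cons_self),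
            if_neg (by simpa using (List.nodup_cons.mp hnd).1)]
        omega
      · rw [if_neg (by simpa using fun hh => h hh.symm)]
        simp [List.mem_cons, h]

lemma mem_expandB (buckets : List Int) (l : List Int) (a : Int)
    (ha : a ∈ expandB buckets l) : a ∈ l := by
  obtain ⟨c, hc, hrep⟩ := List.mem_flatMap.mp ha
  rwa [List.eq_of_mem_replicate hrep]

lemma pairwise_expandB (buckets : List Int) :
    ∀ l : List Int, l.Pairwise (· > ·) →
      (expandB buckets l).Pairwise (fun a b => b ≤ a) := by
  intro l
  induction l with
  | nil => intro _; simp [expandB]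
  | cons c rest ih =>
      intro hpw
      have hexp : expandB buckets (c :: rest)
          = List.replicate (PySem.List.pyGetD buckets c 0).toNat c ++ expandB buckets rest := by
        simp [expandB]
      rw [hexp]
      refine List.pairwise_append.mpr ⟨?_, ih hpw.of_cons, ?_⟩
      · exact List.pairwise_replicate.mpr (Or.inr le_rfl)
      · intro x hx y hy
        rw [List.eq_of_mem_replicate hx]
        have hy' := mem_expandB buckets rest y hy
        exact le_of_lt (List.rel_of_pairwise_cons hpw hy')

lemma pyGetD_zero_replicate (m : Nat) (c : Int) (hc : 0 ≤ c) :
    PySem.List.pyGetD (List.replicate m (0 : Int)) c 0 = 0 := by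
  rw [PySem.List.pyGetD_of_nonneg _ 0 hc, List.getD_eq_getElem?_getD, List.getElem?_replicate]
  split <;> rfl

-- ===== VERDICT (by name: the statement is the Claim_ definition above) =====
theorem solution_spec : Claim_equal_solution := by
  intro k tang _ hPre
  obtain ⟨hne, hk⟩ := hPre
  unfold Spec_solution
  have hn1 : 1 ≤ tang.length := List.length_pos_iff.mpr hne
  -- abbreviations
  set n := tang.length with hn
  set ts := PySem.List.sorted tang (fun x => x) false with hts
  set vsB := (PySem.Dict.counter tang).values with hvsB
  set b0 := PySem.List.pyRepeat [(0 : Int)] ((n : Int) + 1) with hb0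
  set buckets := vsB.foldl
      (fun b c => PySem.List.pySetD b c (PySem.List.pyGetD b c 0 + 1)) b0 with hbuckets
  set rangeL := PySem.List.pyRange (n : Int) 0 (-1) with hrange
  -- buckets characterization
  have hb0rep : b0 = List.replicate (n + 1) (0 : Int) := by
    rw [hb0, PySem.List.pyRepeat_singleton]
    congr 1
  have hb0len : (b0.length : Int) = (n : Int) + 1 := by rw [hb0rep]; simp
  have hvB : ∀ v ∈ vsB, 1 ≤ v ∧ v ≤ (n : Int) := fun v hv => mem_values_counter tang v hv
  have hbuck : ∀ c : Int, 0 ≤ c → PySem.List.pyGetD buckets c 0 = (vsB.count c : Int) := by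
    intro c hc
    rw [hbuckets, buckets_getD vsB b0 (fun v hv => ⟨by have := (hvB v hv).1; omega,
          by have := (hvB v hv).2; omega⟩) c hc, hb0rep, pyGetD_zero_replicate _ _ hc,
        zero_add]
  have hrangemem : ∀ c ∈ rangeL, 0 < c ∧ c ≤ (n : Int) := by
    intro c hc
    exact PySem.List.mem_pyRange_neg_one.mp (hrange ▸ hc)
  have hside : ∀ c ∈ rangeL, 1 ≤ c ∧ 0 ≤ PySem.List.pyGetD buckets c 0 := by
    intro c hc
    obtain ⟨h1, _⟩ := hrangemem c hc
    refine ⟨by omega, ?_⟩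
    rw [hbuck c (by omega)]
    omega
  -- the expansion of the buckets is a permutation of the counter's values
  have hrangend : rangeL.Nodup := by
    rw [hrange, PySem.List.pyRange_neg_one_eq_reverse]
    exact List.nodup_reverse.mpr (PySem.List.nodup_pyRange_one _ _)
  have hEcount : ∀ a : Int, (expandB buckets rangeL).count a = vsB.count a := by
    intro a
    rw [count_expandB buckets rangeL hrangend a]
    by_cases hmem : a ∈ rangeL
    · rw [if_pos hmem, hbuck a (by have := (hrangemem a hmem).1; omega)]
      omega
    · rw [if_neg hmem]
      have : a ∉ vsB := by
        intro hav
        obtain ⟨h1, h2⟩ := hvB a hav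
        exact hmem (hrange ▸ PySem.List.mem_pyRange_neg_one.mpr ⟨by omega, h2⟩)
      exact (List.count_eq_zero.mpr this).symm
  -- the expansion equals A's descending count list: same multiset, both sorted descending
  have hEperm : (expandB buckets rangeL).Perm vsB := List.perm_iff_count.mpr hEcount
  have hperm_ts : ts.Perm tang := PySem.List.sorted_perm tang (fun x => x) false
  have hvperm : ((PySem.Dict.counter ts).values).Perm vsB := values_counter_perm ts tang hperm_ts
  have hvalues : (PySem.Dict.counter ts).values = ((PySem.Dict.counter ts).items).map (fun x => x.2) := rfl
  have hdscperm : ((PySem.List.sorted (PySem.Dict.counter ts).items (fun x => x.2) true).map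
      (fun x => x.2)).Perm ((PySem.Dict.counter ts).values) := by
    rw [hvalues]
    exact (PySem.List.sorted_perm (PySem.Dict.counter ts).items (fun x => x.2) true).map _
  have hdscA_pw : ((PySem.List.sorted (PySem.Dict.counter ts).items (fun x => x.2) true).map
      (fun x => x.2)).Pairwise (fun a b => b ≤ a) :=
    List.pairwise_map.mpr (PySem.List.sorted_pairwise_rev _ _)
  have hE_pw : (expandB buckets rangeL).Pairwise (fun a b => b ≤ a) := by
    apply pairwise_expandB
    rw [hrange, PySem.List.pyRange_neg_one_eq_reverse]
    exact List.pairwise_reverse.mpr (PySem.List.pairwise_lt_pyRange_one _ _)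
  have hdscE : (PySem.List.sorted (PySem.Dict.counter ts).items (fun x => x.2) true).map
      (fun x => x.2) = expandB buckets rangeL :=
    List.Perm.eq_of_pairwise (fun a b _ _ h1 h2 => le_antisymm h2 h1)
      hdscA_pw hE_pw (hdscperm.trans (hvperm.trans hEperm.symm))
  -- the scan succeeds under Pre_
  have hEsum : (expandB buckets rangeL).sum = (n : Int) := by
    rw [hEperm.sum_eq, hvsB, sum_values_counter]
  have hEne : expandB buckets rangeL ≠ [] := by
    intro h
    rw [h] at hEsum
    simp at hEsum
    omega
  have hsome := scanC_isSome k (expandB buckets rangeL) 0 0 hEne (by rw [hEsum]; omega)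
  -- evaluate both ports
  have hA : solution k tang
      = (scanC k ((PySem.List.sorted (PySem.Dict.counter ts).items (fun x => x.2) true).map
          (fun x => x.2)) 0 0).getD 0 := by
    simp only [solution]
    rw [foldA_eq_counter, solnLoopA_eq_scanC, ← hts]
    norm_num
  have hB : solution_alt k tang
      = match scanC k (expandB buckets rangeL) 0 0 with
        | some r => r
        | none => 0 + ((expandB buckets rangeL).length : Int) := by
    simp only [solution_alt]
    rw [PySem.Dict.foldl_insert_getD_add_one_eq_counter, ← hn, ← hvsB, ← hb0, ← hbuckets, ← hrange]
    exact solnLoopB_eq_scanC k buckets rangeL hside 0 0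
  rw [hA, hB, hdscE]
  obtain ⟨r, hr⟩ := Option.isSome_iff_exists.mp hsome
  rw [hr]
  rfl
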